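-- pv_equiv track=rewrite | github.com/carotesel/Fundamentos-Guarna | Temas P1/Listas/guia/ej10.py | verificar_tupla
-- ===== SOURCE A (Python) =====
-- def verificar_tupla(tupla):
--     resultado = []
--
--     for valor in set(tupla):
--         #cantidad = tupla.count(valor)
--
--         cantidad = 0
--
--         for elemento in tupla:
--             if elemento == valor:
--                 cantidad+= 1
--
--         resultado.append([valor, cantidad])
--
--     resultado.sort() # ordena x el primer elemento del par
--     return resultado
-- ===== SOURCE B (Python) =====
-- def verificar_tupla(tupla):
--     resultado = []
--     for x in sorted(tupla):
--         if resultado and resultado[-1][0] == x: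
--             resultado[-1][1] += 1
--         else:
--             resultado.append([x, 1])
--     return resultado
-- ===== Notes on version B (the rewrite author's own statement) =====
-- stated objective: faster
-- what changed: Instead of iterating over set(tupla) with an inner counting scan and a final sort, B sorts the input once and counts equal runs in a single pass, extending the last pair or starting a new one.
import Mathlib
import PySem

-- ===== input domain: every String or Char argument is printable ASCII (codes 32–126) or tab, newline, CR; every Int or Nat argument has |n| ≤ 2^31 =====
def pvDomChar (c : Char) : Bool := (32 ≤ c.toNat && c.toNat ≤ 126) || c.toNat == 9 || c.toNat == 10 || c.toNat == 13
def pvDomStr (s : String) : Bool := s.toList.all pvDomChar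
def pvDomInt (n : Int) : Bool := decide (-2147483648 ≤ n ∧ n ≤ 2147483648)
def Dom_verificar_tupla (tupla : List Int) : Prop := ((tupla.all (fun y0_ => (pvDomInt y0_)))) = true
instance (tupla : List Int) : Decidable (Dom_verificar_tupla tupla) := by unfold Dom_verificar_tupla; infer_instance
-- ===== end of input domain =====

-- B replaces A's per-distinct-value counting scans + final sort by one sort followed by a single
-- run-length pass over the sorted list (objective: faster).

-- ===== PORT A =====
-- for valor in set(tupla): count valor by an inner scan; append [valor, cantidad]; then resultado.sort().
-- The set-iteration order does not reach the result: the pairs have distinct first components, so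
-- after the final sort the result is the same for every iteration order.
def verificar_tupla (tupla : List Int) : List (List Int) :=
  let resultado : List (List Int) := []
  let resultado := (PySem.Set.ofList tupla).foldl
    (fun res valor =>
      let cantidad : Int := 0
      let cantidad := tupla.foldl (fun c elemento => if elemento == valor then c + 1 else c) cantidad
      res ++ [[valor, cantidad]]) resultado
  PySem.List.sorted resultado (fun l => l)

-- ===== PORT B =====
-- one step of B's loop: 'if resultado and resultado[-1][0] == x: resultado[-1][1] += 1 else: resultado.append([x, 1])'.
-- Every element appended is a two-element pair, so matching 'some [v, c]' covers every reachable case.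
def pvStep (acc : List (List Int)) (x : Int) : List (List Int) :=
  match acc.getLast? with
  | some [v, c] => if v = x then acc.dropLast ++ [[v, c + 1]] else acc ++ [[x, 1]]
  | _ => acc ++ [[x, 1]]

def verificar_tupla_alt (tupla : List Int) : List (List Int) :=
  (PySem.List.sorted tupla (fun x => x)).foldl pvStep []

-- ===== PRECONDITION & SPEC =====
def Spec_verificar_tupla (tupla : List Int) (out : List (List Int)) : Prop := out = verificar_tupla_alt tupla
instance (tupla : List Int) (out : List (List Int)) : Decidable (Spec_verificar_tupla tupla out) := by unfold Spec_verificar_tupla; infer_instance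

-- ===== CLAIM (what is proved, stated in full; the proofs are below) =====
def Claim_equal_verificar_tupla : Prop := ∀ (tupla : List Int), Dom_verificar_tupla tupla → Spec_verificar_tupla tupla (verificar_tupla tupla)

-- ===== LEMMAS AND PROOFS =====

-- the distinct values of s, first occurrence first
def pvVals : List Int → List Int
  | [] => []
  | x :: xs => x :: pvVals (xs.filter (fun y => y != x))
termination_by s => s.length
decreasing_by
  simp
  exact List.length_filter_le _ _

theorem pvVals_nil : pvVals [] = [] := by rw [pvVals]

theorem pvVals_cons (x : Int) (xs : List Int) :
    pvVals (x :: xs) = x :: pvVals (xs.filter (fun y => y != x)) := by rw [pvVals]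

theorem pvVals_mem (s : List Int) (y : Int) : y ∈ pvVals s ↔ y ∈ s := by
  induction s using pvVals.induct with
  | case1 => simp [pvVals_nil]
  | case2 x xs ih =>
    simp at ih
    rw [pvVals_cons]
    simp only [List.mem_cons, ih]
    by_cases hyx : y = x <;> simp [hyx]

theorem pvVals_nodup (s : List Int) : (pvVals s).Nodup := by
  induction s using pvVals.induct with
  | case1 => simp [pvVals_nil]
  | case2 x xs ih =>
    simp at ih
    rw [pvVals_cons]
    refine List.nodup_cons.mpr ⟨fun hx => ?_, ih⟩
    have := (pvVals_mem _ x).mp hx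
    simp at this

theorem pvVals_pairwise (s : List Int) (hs : s.Pairwise (· ≤ ·)) :
    (pvVals s).Pairwise (· < ·) := by
  induction s using pvVals.induct with
  | case1 => simp [pvVals_nil]
  | case2 x xs ih =>
    simp at ih
    rw [pvVals_cons]
    rcases List.pairwise_cons.mp hs with ⟨hle, hxs⟩
    refine List.pairwise_cons.mpr ⟨fun y hy => ?_, ih (hxs.filter _)⟩
    rcases List.mem_filter.mp ((pvVals_mem _ y).mp hy) with ⟨hmem, hne⟩
    have := hle y hmem
    simp at hne
    omega

-- B's fold computes, for a ≤-sorted remainder s and a pending group [[v, c]] at the end of acc,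
-- the total count of v and one pair per further distinct value
theorem pvFold_invariant (s : List Int) (init : List (List Int)) (v c : Int)
    (hs : s.Pairwise (· ≤ ·)) (hv : ∀ y ∈ s, v ≤ y) :
    s.foldl pvStep (init ++ [[v, c]]) =
      init ++ ([v, c + (s.count v : Int)] ::
        ((pvVals (s.filter (fun y => y != v))).map (fun w => [w, (s.count w : Int)]))) := by
  induction s generalizing init v c with
  | nil => simp [pvVals_nil]
  | cons x s' ih =>
    rcases List.pairwise_cons.mp hs with ⟨hle, hs'⟩
    by_cases hxv : x = v
    · subst hxv
      have hstep : pvStep (init ++ [[x, c]]) x = init ++ [[x, c + 1]] := by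
        simp [pvStep]
      rw [List.foldl_cons, hstep, ih init x (c + 1) hs' hle]
      have hf : (x :: s').filter (fun y => y != x) = s'.filter (fun y => y != x) := by simp
      rw [hf, List.count_cons_self]
      congr 2
      · simp only [List.cons.injEq, true_and, and_true]
        push_cast
        omega
      · apply List.map_congr_left
        intro w hw
        have hwne : ¬ w = x := by
          have := List.mem_filter.mp ((pvVals_mem _ w).mp hw)
          simpa using this.2
        simp [List.count_cons]
        exact fun h => hwne h.symm
    · have hvx : v < x := lt_of_le_of_ne (hv x (by simp)) (fun h => hxv h.symm)
      have hvnot : v ∉ s' := fun hmem => absurd (hle v hmem) (by omega)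
      have hvx' : ¬ v = x := by omega
      have hstep : pvStep (init ++ [[v, c]]) x = (init ++ [[v, c]]) ++ [[x, 1]] := by
        simp [pvStep, hvx']
      rw [List.foldl_cons, hstep, ih (init ++ [[v, c]]) x 1 hs' hle]
      have hcv : (x :: s').count v = 0 := by
        simp [hxv, List.count_eq_zero.mpr hvnot]
      have hfv : (x :: s').filter (fun y => y != v) = x :: s' := by
        rw [List.filter_cons_of_pos (by simpa using hxv)]
        congr 1
        refine List.filter_eq_self.mpr (fun y hy => ?_)
        have : ¬ y = v := fun h => hvnot (h ▸ hy)
        simpa using this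
      rw [hcv, hfv, pvVals_cons]
      simp only [List.map_cons, List.count_cons_self, List.append_assoc, List.cons_append,
        List.nil_append]
      congr 1
      congr 1
      · simp
      congr 1
      · simp only [List.cons.injEq, true_and, and_true]
        push_cast
        omega
      · apply List.map_congr_left
        intro w hw
        have hwne : ¬ w = x := by
          have := List.mem_filter.mp ((pvVals_mem _ w).mp hw)
          simpa using this.2
        simp [List.count_cons]
        exact fun h => hwne h.symm

-- B equals one pair [v, count] per distinct value of its sorted input, in order of first occurrence
theorem alt_eq_map (tupla : List Int) :
    verificar_tupla_alt tupla =
      (pvVals (PySem.List.sorted tupla (fun x => x))).map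
        (fun v => [v, (tupla.count v : Int)]) := by
  unfold verificar_tupla_alt
  have hcnt : ∀ v : Int, (PySem.List.sorted tupla (fun x => x)).count v = tupla.count v :=
    fun v => (PySem.List.sorted_perm tupla (fun x => x) false).count_eq v
  rcases hS : PySem.List.sorted tupla (fun x => x) with _ | ⟨x, s'⟩
  · simp [pvVals_nil]
  · have hpw : (x :: s').Pairwise (· ≤ ·) := by
      have := PySem.List.sorted_pairwise tupla (fun x => x) (κ := Int)
      rw [hS] at this
      exact this
    rcases List.pairwise_cons.mp hpw with ⟨hle, hs'⟩
    have hfirst : pvStep [] x = [] ++ [[x, 1]] := by simp [pvStep]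
    rw [List.foldl_cons, hfirst, pvFold_invariant s' [] x 1 hs' hle, pvVals_cons]
    simp only [List.nil_append, List.map_cons]
    have hcx : tupla.count x = s'.count x + 1 := by
      rw [← hcnt x, hS, List.count_cons_self]
    congr 1
    · rw [hcx]; push_cast; ring_nf
    · apply List.map_congr_left
      intro w hw
      have hwne : ¬ w = x := by
        have := List.mem_filter.mp ((pvVals_mem _ w).mp hw)
        simpa using this.2
      have : tupla.count w = s'.count w := by
        rw [← hcnt w, hS, List.count_cons_of_ne (fun h => hwne h.symm)]
      rw [this]

-- A's loop body is 'append [valor, count valor tupla]'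
theorem a_body (tupla : List Int) :
    (PySem.Set.ofList tupla).foldl
      (fun res valor =>
        res ++ [[valor, tupla.foldl (fun c elemento => if elemento == valor then c + 1 else c) 0]])
      [] = (PySem.Set.ofList tupla).map (fun v => [v, (tupla.count v : Int)]) := by
  have h : ∀ (acc : List (List Int)) (v : Int), v ∈ PySem.Set.ofList tupla →
      acc ++ [[v, tupla.foldl (fun c elemento => if elemento == v then c + 1 else c) 0]] =
        acc ++ [[v, (tupla.count v : Int)]] := by
    intro acc v _
    rw [PySem.List.foldl_beq_add_one]
    simp
  refine Eq.trans (PySem.List.foldl_congr_mem _ _ _ _ h) ?_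
  rw [PySem.List.foldl_append_singleton_eq_map]
  simp

-- ===== VERDICT (by name: the statement is the Claim_ definition above) =====
theorem verificar_tupla_spec : Claim_equal_verificar_tupla := by
  intro tupla _
  unfold Spec_verificar_tupla verificar_tupla
  simp only []
  rw [a_body, alt_eq_map]
  have hperm : ((pvVals (PySem.List.sorted tupla (fun x => x))).map
      (fun v => [v, (tupla.count v : Int)])).Perm
      ((PySem.Set.ofList tupla).map (fun v => [v, (tupla.count v : Int)])) := by
    refine List.Perm.map _ ?_
    refine (List.perm_ext_iff_of_nodup (pvVals_nodup _) (PySem.Set.nodup_ofList _)).mpr ?_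
    intro y
    rw [pvVals_mem, PySem.List.mem_sorted, PySem.Set.mem_ofList]
  have hpw : ((pvVals (PySem.List.sorted tupla (fun x => x))).map
      (fun v => [v, (tupla.count v : Int)])).Pairwise (· < ·) := by
    exact List.Pairwise.map (fun v => ([v, (tupla.count v : Int)] : List Int))
      (fun a b hab => by constructor; exact hab)
      (pvVals_pairwise _ (PySem.List.sorted_pairwise tupla (fun x => x)))
  have h := PySem.List.sorted_eq_of_perm_of_pairwise_lt _ _ (fun l => l) hperm hpw
  convert h using 2
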